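-- pv_equiv track=rewrite | github.com/daniel-reich/ubiquitous-fiesta | hv572GaPtbqwhJpTb_5.py | elasticize
-- ===== SOURCE A (Python) =====
-- def elasticize(word):
--   n=len(word)
--   if n%2:
--     pivot=word[n//2]
--     left=''
--     right=''
--     for i in range(n//2):
--       left+=word[:n//2][i]*(i+1)
--       right+=word[n//2+1:][::-1][i]*(i+1)
--     return left+pivot*(n//2+1)+right[::-1]
--   else:
--     left=''
--     right=''
--     for i in range(n//2):
--       left+=word[:n//2][i]*(i+1)
--       right+=word[n//2:][::-1][i]*(i+1)
--     return left+right[::-1]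
-- ===== SOURCE B (Python) =====
-- def elasticize(word):
--     n = len(word)
--     return ''.join(c * min(i + 1, n - i) for i, c in enumerate(word))
-- ===== Notes on version B (the rewrite author's own statement) =====
-- stated objective: simpler
-- what changed: Replaces A's parity split into left/pivot/right halves with slicing and two string reversals by one enumerate pass concatenating c*min(i+1,n-i), the closed-form distance-from-center count.
import Mathlib
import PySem

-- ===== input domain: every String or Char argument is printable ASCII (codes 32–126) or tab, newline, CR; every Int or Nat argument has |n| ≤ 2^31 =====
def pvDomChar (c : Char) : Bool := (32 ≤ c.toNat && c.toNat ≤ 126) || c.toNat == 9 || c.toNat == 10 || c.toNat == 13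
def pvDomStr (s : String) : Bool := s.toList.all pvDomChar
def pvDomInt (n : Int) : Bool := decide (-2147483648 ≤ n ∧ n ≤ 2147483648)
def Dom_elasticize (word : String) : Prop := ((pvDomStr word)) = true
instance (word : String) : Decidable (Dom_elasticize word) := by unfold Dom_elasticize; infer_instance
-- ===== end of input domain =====

-- B replaces A's parity split into left/pivot/right halves (with slicing and reversals)
-- by a single enumerate pass concatenating c * min(i+1, n-i); proved equal for all strings.

-- ===== PORT A =====
-- Literal port of A on the character list (n = len(word) and the list of word are inlined).
-- The indexings word[:n//2][i], word[n//2+1:][::-1][i], word[n//2:][::-1][i] and word[n//2]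
-- are all in range for the indices A uses, so they are ported as List.getD with a default
-- that is never read.
def elasticize (word : String) : String :=
  if word.toList.length % 2 = 1 then
    let p := (List.range (word.toList.length / 2)).foldl
      (fun s i =>
        (s.1 ++ List.replicate (i + 1) ((word.toList.take (word.toList.length / 2)).getD i ' '),
         s.2 ++ List.replicate (i + 1) (((word.toList.drop (word.toList.length / 2 + 1)).reverse).getD i ' ')))
      ([], [])
    String.ofList (p.1 ++ List.replicate (word.toList.length / 2 + 1) (word.toList.getD (word.toList.length / 2) ' ') ++ p.2.reverse)
  else
    let p := (List.range (word.toList.length / 2)).foldl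
      (fun s i =>
        (s.1 ++ List.replicate (i + 1) ((word.toList.take (word.toList.length / 2)).getD i ' '),
         s.2 ++ List.replicate (i + 1) (((word.toList.drop (word.toList.length / 2)).reverse).getD i ' ')))
      ([], [])
    String.ofList (p.1 ++ p.2.reverse)

-- ===== PORT B =====
-- one pass over enumerate(word); c * k for a Python int k is empty when k ≤ 0, so .toNat is exact
def elasticize_alt (word : String) : String :=
  String.ofList ((PySem.List.enumerate word.toList 0).flatMap
    (fun ic => List.replicate (min (ic.1 + 1) (PySem.Str.len word - ic.1)).toNat ic.2))

-- ===== PRECONDITION & SPEC =====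
def Spec_elasticize (word : String) (out : String) : Prop := out = elasticize_alt word
instance (word : String) (out : String) : Decidable (Spec_elasticize word out) := by unfold Spec_elasticize; infer_instance

-- ===== CLAIM (what is proved, stated in full; the proofs are below) =====
def Claim_equal_elasticize : Prop := ∀ (word : String), Dom_elasticize word → Spec_elasticize word (elasticize word)

-- ===== LEMMAS AND PROOFS =====

-- canonical form both ports are reduced to: char i repeated min(i+1, n-i) times
def pvPyr (l : List Char) : List Char :=
  (List.range l.length).flatMap
    (fun i => List.replicate (min (i + 1) (l.length - i)) (l.getD i ' '))

theorem pv_foldl_pair (f g : Nat → List Char) :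
    ∀ (k : Nat) (a b : List Char),
      (List.range k).foldl (fun s i => (s.1 ++ f i, s.2 ++ g i)) (a, b)
        = (a ++ (List.range k).flatMap f, b ++ (List.range k).flatMap g) := by
  intro k
  induction k with
  | zero => simp
  | succ k ih =>
    intro a b
    simp [List.range_succ, List.foldl_append, ih, List.flatMap_append]

theorem pv_fm_congr (k : Nat) (f g : Nat → List Char)
    (h : ∀ i, i < k → f i = g i) :
    (List.range k).flatMap f = (List.range k).flatMap g := by
  induction k with
  | zero => simp
  | succ k ih =>
    simp [List.range_succ, List.flatMap_append,
      ih (fun i hi => h i (Nat.lt_succ_of_lt hi)), h k (Nat.lt_succ_self k)]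

theorem pv_rev_fm (f : Nat → List Char) :
    ∀ (m : Nat), ((List.range m).flatMap f).reverse
      = (List.range m).flatMap (fun j => (f (m - 1 - j)).reverse) := by
  intro m
  induction m with
  | zero => simp
  | succ m ih =>
    conv_lhs => rw [List.range_succ]
    rw [List.flatMap_append, List.reverse_append, ih]
    conv_rhs => rw [List.range_succ_eq_map]
    simp only [List.flatMap_cons, List.flatMap_map]
    congr 1
    · simp
    · apply pv_fm_congr
      intro i hi
      congr 2
      omega

theorem pv_fm_enumerate (h : Int × Char → List Char) :
    ∀ (xs : List Char) (s : Int),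
      (PySem.List.enumerate xs s).flatMap h
        = (List.range xs.length).flatMap (fun (k : Nat) => h (s + (k : Int), xs.getD k ' ')) := by
  intro xs
  induction xs with
  | nil => intro s; simp [PySem.List.enumerate_nil]
  | cons x xs ih =>
    intro s
    rw [PySem.List.enumerate_cons, List.flatMap_cons, ih,
      List.length_cons, List.range_succ_eq_map]
    simp only [List.flatMap_cons, List.flatMap_map]
    congr 1
    · simp
    · apply pv_fm_congr
      intro i hi
      simp only [List.getD_cons_succ]
      congr 2
      push_cast
      ring

theorem pv_getD_take (l : List Char) (m i : Nat) (h : i < m) :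
    (l.take m).getD i ' ' = l.getD i ' ' := by
  simp [List.getD, h]

theorem pv_getD_rev_drop (l : List Char) (k i : Nat)
    (h : i < l.length - k) :
    ((l.drop k).reverse).getD i ' ' = l.getD (l.length - 1 - i) ' ' := by
  have h1 : i < (l.drop k).length := by simp; omega
  simp only [List.getD]
  rw [List.getElem?_reverse h1, List.getElem?_drop]
  simp only [List.length_drop]
  have h2 : k + (l.length - k - 1 - i) = l.length - 1 - i := by omega
  rw [h2]

theorem pv_alt_eq (word : String) :
    elasticize_alt word = String.ofList (pvPyr word.toList) := by
  unfold elasticize_alt pvPyr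
  congr 1
  rw [pv_fm_enumerate]
  apply pv_fm_congr
  intro i hi
  congr 1
  have hlen : PySem.Str.len word = (word.toList.length : Int) := by
    simp [PySem.Str.len]
  rw [hlen]
  omega

-- the odd case: left pyramid ++ pivot block ++ reversed right pyramid = pvPyr
theorem pv_pyr_odd (l : List Char) (m : Nat) (hm : l.length = 2 * m + 1) :
    (List.range m).flatMap (fun i => List.replicate (i + 1) ((l.take m).getD i ' '))
      ++ List.replicate (m + 1) (l.getD m ' ')
      ++ ((List.range m).flatMap
            (fun i => List.replicate (i + 1) (((l.drop (m + 1)).reverse).getD i ' '))).reverse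
      = pvPyr l := by
  unfold pvPyr
  rw [pv_rev_fm, hm]
  have hsplit : 2 * m + 1 = m + (m + 1) := by omega
  rw [hsplit, List.range_add, List.flatMap_append, List.flatMap_map,
    List.range_succ_eq_map]
  simp only [List.flatMap_cons, List.flatMap_map]
  rw [List.append_assoc]
  congr 1
  · apply pv_fm_congr
    intro i hi
    rw [pv_getD_take l m i hi]
    congr 1
    omega
  · congr 1
    · have h2 : min (m + 0 + 1) (m + (m + 1) - (m + 0)) = m + 1 := by omega
      rw [h2]
      norm_num
    · apply pv_fm_congr
      intro i hi
      rw [List.reverse_replicate, pv_getD_rev_drop l (m + 1) (m - 1 - i) (by omega)]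
      congr 1
      · omega
      · congr 1
        omega

-- the even case
theorem pv_pyr_even (l : List Char) (m : Nat) (hm : l.length = 2 * m) :
    (List.range m).flatMap (fun i => List.replicate (i + 1) ((l.take m).getD i ' '))
      ++ ((List.range m).flatMap
            (fun i => List.replicate (i + 1) (((l.drop m).reverse).getD i ' '))).reverse
      = pvPyr l := by
  unfold pvPyr
  rw [pv_rev_fm, hm]
  have hsplit : 2 * m = m + m := by omega
  rw [hsplit, List.range_add, List.flatMap_append, List.flatMap_map]
  congr 1
  · apply pv_fm_congr
    intro i hi
    rw [pv_getD_take l m i hi]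
    congr 1
    omega
  · apply pv_fm_congr
    intro i hi
    rw [List.reverse_replicate, pv_getD_rev_drop l m (m - 1 - i) (by omega)]
    congr 1
    · omega
    · congr 1
      omega

theorem pv_a_eq (word : String) :
    elasticize word = String.ofList (pvPyr word.toList) := by
  unfold elasticize
  by_cases hpar : word.toList.length % 2 = 1
  · obtain ⟨m, hm⟩ : ∃ m, word.toList.length = 2 * m + 1 := ⟨word.toList.length / 2, by omega⟩
    have hdiv : word.toList.length / 2 = m := by omega
    rw [if_pos hpar]
    simp only [hdiv, pv_foldl_pair, List.nil_append]
    exact congrArg String.ofList (pv_pyr_odd word.toList m hm)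
  · obtain ⟨m, hm⟩ : ∃ m, word.toList.length = 2 * m := ⟨word.toList.length / 2, by omega⟩
    have hdiv : word.toList.length / 2 = m := by omega
    rw [if_neg hpar]
    simp only [hdiv, pv_foldl_pair, List.nil_append]
    exact congrArg String.ofList (pv_pyr_even word.toList m hm)

-- ===== VERDICT (by name: the statement is the Claim_ definition above) =====
theorem elasticize_spec : Claim_equal_elasticize := by
  intro word _
  unfold Spec_elasticize
  rw [pv_alt_eq, pv_a_eq]
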